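-- pv_equiv track=rewrite | github.com/by-hwa/kedro_test | h2-diagnosis-algorithm/src/h2_diagnosis_algorithm/pipelines/data_preprocessing/nodes.py | _extract_asset_name
-- ===== SOURCE A (Python) =====
-- def _extract_asset_name(columns):
--     """
--     Extract the asset names, removing the asset types such as [HPC-301A].
--
--     columns: all columns
--     """
--     all_assets = []
--     for col in columns:
--         if '[' not in col:
--             continue
--         asset_name = col[col.index('[')+1 : col.index(']')]
--         if asset_name not in all_assets:
--             all_assets.append(asset_name)
--     return all_assets
-- ===== SOURCE B (Python) =====
-- def _extract_asset_name(columns):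
--     # Back-to-front scan: walk the columns in reverse, prepend each extracted
--     # name and delete any later duplicate of it already collected; the first
--     # (leftmost) occurrence therefore ends up keeping its position.
--     assets = []
--     for col in reversed(columns):
--         if '[' in col:
--             name = col[col.index('[')+1 : col.index(']')]
--             assets = [name] + [x for x in assets if x != name]
--     return assets
-- ===== Notes on version B (the rewrite author's own statement) =====
-- stated objective: alternative
-- what changed: A scans forward and deduplicates by skipping names already appended; B scans the columns in reverse, prepending each extracted name and deleting its later duplicates from the accumulator, so first occurrences survive by overwriting instead of by a seen-check.
import Mathlib
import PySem

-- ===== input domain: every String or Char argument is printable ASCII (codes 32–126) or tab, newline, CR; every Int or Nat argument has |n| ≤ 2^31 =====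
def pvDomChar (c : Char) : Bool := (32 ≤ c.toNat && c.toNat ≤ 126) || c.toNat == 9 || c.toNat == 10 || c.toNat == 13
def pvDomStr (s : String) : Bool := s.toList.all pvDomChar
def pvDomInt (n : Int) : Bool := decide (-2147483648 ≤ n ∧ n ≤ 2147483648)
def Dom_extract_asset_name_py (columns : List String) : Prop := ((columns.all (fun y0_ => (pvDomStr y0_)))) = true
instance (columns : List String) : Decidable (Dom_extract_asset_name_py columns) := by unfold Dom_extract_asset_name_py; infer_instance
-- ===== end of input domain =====

-- B scans the columns in REVERSE, prepending each extracted name and deleting its later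
-- duplicates, instead of A's forward scan with a seen-check; same values, same cost class
-- (objective: alternative).

-- shared helper: the extraction expression col[col.index('[')+1 : col.index(']')],
-- identical in both Pythons (PySem.Str.find = Python str.find; it equals str.index
-- whenever the substring is present, which Pre_ guarantees where it is evaluated)
def pvName (col : String) : String :=
  PySem.Str.slice col (some (PySem.Str.find col "[" + 1)) (some (PySem.Str.find col "]"))

-- ===== PORT A =====
def extract_asset_name_py (columns : List String) : List String :=
  columns.foldl (fun all_assets col =>
    if PySem.Str.isIn "[" col = false then all_assets
    else
      let asset_name := pvName col
      if asset_name ∈ all_assets then all_assets else all_assets ++ [asset_name]) []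

-- ===== PORT B =====
def extract_asset_name_py_alt (columns : List String) : List String :=
  columns.reverse.foldl (fun assets col =>
    if PySem.Str.isIn "[" col then
      let name := pvName col
      name :: assets.filter (fun x => x != name)
    else assets) []

-- ===== PRECONDITION & SPEC =====
-- Pre_ excludes exactly the inputs where some column contains '[' but no ']': there
-- col.index(']') raises ValueError in A (and in B alike).
def Pre_extract_asset_name_py (columns : List String) : Prop :=
  ∀ col ∈ columns, PySem.Str.isIn "[" col = true → PySem.Str.isIn "]" col = true
instance (columns : List String) : Decidable (Pre_extract_asset_name_py columns) := by
  unfold Pre_extract_asset_name_py; infer_instance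

def pvWitness_extract_asset_name_py : List String := ["x[A]", "temp", "y[B] t", "z[A]"]

def Spec_extract_asset_name_py (columns : List String) (out : List String) : Prop := out = extract_asset_name_py_alt columns
instance (columns : List String) (out : List String) : Decidable (Spec_extract_asset_name_py columns out) := by unfold Spec_extract_asset_name_py; infer_instance

-- ===== CLAIM (what is proved, stated in full; the proofs are below) =====
def Claim_equal_extract_asset_name_py : Prop := ∀ (columns : List String), Dom_extract_asset_name_py columns → Pre_extract_asset_name_py columns → Spec_extract_asset_name_py columns (extract_asset_name_py columns)

-- ===== LEMMAS AND PROOFS =====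

-- reference keep-first dedup: head kept, its duplicates deleted from the deduped tail
def pvDedupF : List String → List String
  | [] => []
  | x :: xs => x :: (pvDedupF xs).filter (fun z => z != x)

-- the forward step of A, on the already-extracted name list
def pvStep (acc : List String) (x : String) : List String :=
  if x ∈ acc then acc else acc ++ [x]

theorem pvDedupF_filter (p : String → Bool) (l : List String) :
    (pvDedupF l).filter p = pvDedupF (l.filter p) := by
  induction l with
  | nil => simp [pvDedupF]
  | cons y m ih =>
    by_cases hp : p y = true
    · simp only [pvDedupF, List.filter_cons, hp, if_pos]
      rw [List.filter_comm, ih]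
    · simp only [pvDedupF, List.filter_cons, hp]
      rw [List.filter_comm, ih]
      apply List.filter_eq_self.mpr
      intro a ha
      have hpa : p a = true := by
        rw [← ih] at ha
        exact (List.mem_filter.mp ha).2
      have : a ≠ y := by intro h; rw [h] at hpa; exact hp hpa
      simpa using this

theorem pvStep_foldl (l : List String) (acc : List String) :
    List.foldl pvStep acc l = acc ++ pvDedupF (l.filter (fun z => decide (z ∉ acc))) := by
  induction l generalizing acc with
  | nil => simp [pvDedupF]
  | cons x xs ih =>
    by_cases hx : x ∈ acc
    · have : pvStep acc x = acc := by simp [pvStep, hx]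
      simp only [List.foldl_cons, this, ih, List.filter_cons, hx]
      simp
    · have hstep : pvStep acc x = acc ++ [x] := by simp [pvStep, hx]
      have hpred : xs.filter (fun z => decide (z ∉ acc ++ [x]))
          = (xs.filter (fun z => decide (z ∉ acc))).filter (fun z => z != x) := by
        rw [List.filter_filter]
        apply List.filter_congr
        intro z _
        by_cases hz : z = x
        · simp [hz]
        · by_cases hza : z ∈ acc <;> simp [hz, hza]
      calc List.foldl pvStep acc (x :: xs)
          = List.foldl pvStep (acc ++ [x]) xs := by rw [List.foldl_cons, hstep]
        _ = (acc ++ [x]) ++ pvDedupF ((xs.filter (fun z => decide (z ∉ acc))).filter (fun z => z != x)) := by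
              rw [ih, hpred]
        _ = (acc ++ [x]) ++ (pvDedupF (xs.filter (fun z => decide (z ∉ acc)))).filter (fun z => z != x) := by
              rw [pvDedupF_filter]
        _ = acc ++ pvDedupF ((x :: xs).filter (fun z => decide (z ∉ acc))) := by
              simp [hx, pvDedupF]

-- A's interleaved loop equals the plain pvStep fold over the extracted names
theorem pvA_fold (cols : List String) (acc : List String) :
    cols.foldl (fun all_assets col =>
      if PySem.Str.isIn "[" col = false then all_assets
      else
        let asset_name := pvName col
        if asset_name ∈ all_assets then all_assets else all_assets ++ [asset_name]) acc
    = List.foldl pvStep acc ((cols.filter (fun c => PySem.Str.isIn "[" c)).map pvName) := by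
  induction cols generalizing acc with
  | nil => rfl
  | cons c cs ih =>
    by_cases h : PySem.Str.isIn "[" c
    all_goals simp only [PySem.Str.isIn_eq, show "[".toList = ['['] from rfl] at h ih
    · simp [h, ih, pvStep]
    · simp [h, ih]

-- B's reversed loop equals pvDedupF of the extracted names
theorem pvB_fold (cols : List String) :
    cols.reverse.foldl (fun assets col =>
      if PySem.Str.isIn "[" col then
        let name := pvName col
        name :: assets.filter (fun x => x != name)
      else assets) []
    = pvDedupF ((cols.filter (fun c => PySem.Str.isIn "[" c)).map pvName) := by
  rw [List.foldl_reverse]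
  induction cols with
  | nil => rfl
  | cons c cs ih =>
    by_cases h : PySem.Str.isIn "[" c
    all_goals simp only [PySem.Str.isIn_eq, show "[".toList = ['['] from rfl] at h ih
    · simp [h, ih, pvDedupF]
    · simp [h, ih]

-- ===== VERDICT (by name: the statement is the Claim_ definition above) =====
theorem extract_asset_name_py_spec : Claim_equal_extract_asset_name_py := by
  intro columns _ _
  unfold Spec_extract_asset_name_py extract_asset_name_py extract_asset_name_py_alt
  rw [pvA_fold, pvB_fold, pvStep_foldl]
  simp
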